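-- pv_equiv track=rewrite | github.com/nbljaved/public | books/Software Design by Example/src/ch8/main.py | do_get
-- ===== SOURCE A (Python) =====
-- def do_get(env, args):
--     # pprint('do_get')
--     # pprint(f'env: {env}')
--     # pprint(f'args: {args}')
--     assert len(args) == 1
--     assert isinstance(args[0], str)
--     name = args[0]
--     for d in reversed(env):
--         if name in d:
--             return d[name]
--     raise Exception(f'nothing defined with name: {name}')
-- ===== SOURCE B (Python) =====
-- def do_get(env, args):
--     assert len(args) == 1
--     assert isinstance(args[0], str)
--     name = args[0]
--     merged = {}
--     for d in env:
--         merged.update(d)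
--     if name in merged:
--         return merged[name]
--     raise Exception(f'nothing defined with name: {name}')
-- ===== Notes on version B (the rewrite author's own statement) =====
-- stated objective: alternative
-- what changed: Replaces the reversed early-exit scan over scopes with a single forward merge of all scopes into one dictionary (later scopes overwrite earlier ones) followed by one lookup.
import Mathlib
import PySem

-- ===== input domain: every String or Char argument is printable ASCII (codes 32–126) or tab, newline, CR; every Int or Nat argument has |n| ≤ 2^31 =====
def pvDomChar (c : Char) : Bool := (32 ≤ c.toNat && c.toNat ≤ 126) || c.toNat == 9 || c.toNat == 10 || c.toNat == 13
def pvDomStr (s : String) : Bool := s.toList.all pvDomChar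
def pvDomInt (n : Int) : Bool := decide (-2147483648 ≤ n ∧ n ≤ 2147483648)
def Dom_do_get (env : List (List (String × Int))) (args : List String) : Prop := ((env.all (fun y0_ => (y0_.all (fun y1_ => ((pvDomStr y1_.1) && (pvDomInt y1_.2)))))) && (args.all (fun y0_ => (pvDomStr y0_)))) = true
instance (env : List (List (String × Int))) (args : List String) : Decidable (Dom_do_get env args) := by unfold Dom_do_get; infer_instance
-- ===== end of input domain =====

-- B replaces A's reversed early-exit scan over scopes with a forward merge of all scopes
-- into one dictionary (inner scopes overwrite outer) followed by a single lookup (objective: alternative).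


-- ===== PORT A =====
-- 'for d in reversed(env): if name in d: return d[name]'; 0 stands for the raise, excluded by Pre_.
def lookRevA (name : String) : List (List (String × Int)) → Int
  | [] => 0
  | d :: rest =>
    match d.find? (fun p => p.1 == name) with
    | some p => p.2
    | none => lookRevA name rest

def do_get (env : List (List (String × Int))) (args : List String) : Int :=
  let name := (PySem.List.pyGet? args 0).getD ""
  lookRevA name env.reverse

-- ===== PORT B =====
-- merged = {}; for d in env: merged.update(d); return merged[name]  (0 stands for the raise, excluded by Pre_)
def do_get_alt (env : List (List (String × Int))) (args : List String) : Int :=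
  let name := (PySem.List.pyGet? args 0).getD ""
  let merged := env.foldl (fun m d => d.foldl (fun m p => m.insert p.1 p.2) m) PySem.Dict.empty
  (merged.get? name).getD 0

-- ===== PRECONDITION & SPEC =====
-- Pre_ excludes exactly the inputs on which A raises (len(args) != 1, or the name bound in no
-- scope), and scopes whose association list has duplicate keys: each scope models a Python dict,
-- which cannot hold duplicate keys, so such lists correspond to no Python input.
def Pre_do_get (env : List (List (String × Int))) (args : List String) : Prop :=
  args.length = 1 ∧ (∀ d ∈ env, (d.map Prod.fst).Nodup) ∧
    (∃ d ∈ env, ∃ p ∈ d, p.1 = (PySem.List.pyGet? args 0).getD "")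
instance (env : List (List (String × Int))) (args : List String) : Decidable (Pre_do_get env args) := by unfold Pre_do_get; infer_instance

def pvWitness_do_get : (List (List (String × Int))) × List String :=
  ([[("x", 1), ("y", 2)], [("x", 7)]], ["x"])

def Spec_do_get (env : List (List (String × Int))) (args : List String) (out : Int) : Prop := out = do_get_alt env args
instance (env : List (List (String × Int))) (args : List String) (out : Int) : Decidable (Spec_do_get env args out) := by unfold Spec_do_get; infer_instance

-- ===== CLAIM (what is proved, stated in full; the proofs are below) =====
def Claim_equal_do_get : Prop := ∀ (env : List (List (String × Int))) (args : List String), Dom_do_get env args → Pre_do_get env args → Spec_do_get env args (do_get env args)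

-- ===== LEMMAS AND PROOFS =====

-- proof-side description of the lookup: later scopes take precedence
def lookFwd (name : String) : List (List (String × Int)) → Option Int
  | [] => none
  | d :: rest =>
    match lookFwd name rest with
    | some v => some v
    | none => (d.find? (fun p => p.1 == name)).map (·.2)

-- A's reversed scan, as an Option
def lookRevO (name : String) : List (List (String × Int)) → Option Int
  | [] => none
  | d :: rest =>
    match d.find? (fun p => p.1 == name) with
    | some p => some p.2
    | none => lookRevO name rest

theorem lookRevA_eq (name : String) (l : List (List (String × Int))) :
    lookRevA name l = (lookRevO name l).getD 0 := by
  induction l with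
  | nil => rfl
  | cons d rest ih =>
    simp only [lookRevA, lookRevO]
    cases d.find? (fun p => p.1 == name) <;> simp [ih]

theorem lookRevO_append (name : String) (l₁ l₂ : List (List (String × Int))) :
    lookRevO name (l₁ ++ l₂) =
      match lookRevO name l₁ with
      | some v => some v
      | none => lookRevO name l₂ := by
  induction l₁ with
  | nil => simp [lookRevO]
  | cons d rest ih =>
    simp only [List.cons_append, lookRevO]
    cases d.find? (fun p => p.1 == name) <;> simp [ih]

theorem lookFwd_eq_rev (name : String) (l : List (List (String × Int))) :
    lookFwd name l = lookRevO name l.reverse := by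
  induction l with
  | nil => rfl
  | cons d rest ih =>
    simp only [lookFwd, List.reverse_cons, lookRevO_append, ih, lookRevO]
    cases lookRevO name rest.reverse <;> cases d.find? (fun p => p.1 == name) <;> simp

theorem get?_foldl_insert_of_not_key (name : String) (d : List (String × Int))
    (m : PySem.Dict String Int) (h : ∀ p ∈ d, p.1 ≠ name) :
    (d.foldl (fun m p => m.insert p.1 p.2) m).get? name = m.get? name := by
  induction d generalizing m with
  | nil => rfl
  | cons p rest ih =>
    simp only [List.foldl_cons]
    rw [ih _ (fun q hq => h q (List.mem_cons_of_mem _ hq))]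
    exact PySem.Dict.get?_insert_of_ne _ _ (Ne.symm (h p List.mem_cons_self))

-- one scope with distinct keys: the insert loop behaves like first-match find?
theorem get?_foldl_insert_scope (name : String) (d : List (String × Int))
    (m : PySem.Dict String Int) (hnd : (d.map Prod.fst).Nodup) :
    (d.foldl (fun m p => m.insert p.1 p.2) m).get? name =
      match d.find? (fun p => p.1 == name) with
      | some p => some p.2
      | none => m.get? name := by
  induction d generalizing m with
  | nil => rfl
  | cons p rest ih =>
    simp only [List.map_cons, List.nodup_cons] at hnd
    simp only [List.foldl_cons]
    by_cases hp : p.1 = name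
    · subst hp
      rw [List.find?_cons_of_pos (h := by simp)]
      rw [get?_foldl_insert_of_not_key p.1 rest _
          (fun q hq hqe => hnd.1 (hqe ▸ List.mem_map_of_mem hq)),
        PySem.Dict.get?_insert_self]
    · rw [List.find?_cons_of_neg (h := by simp [hp])]
      rw [ih _ hnd.2]
      cases rest.find? (fun q => q.1 == name) with
      | some q => rfl
      | none => exact PySem.Dict.get?_insert_of_ne _ _ (fun h => hp h.symm)

-- the whole merge: lookup equals lookFwd
theorem get?_merge (name : String) (env : List (List (String × Int)))
    (m : PySem.Dict String Int) (hnd : ∀ d ∈ env, (d.map Prod.fst).Nodup) :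
    (env.foldl (fun m d => d.foldl (fun m p => m.insert p.1 p.2) m) m).get? name =
      match lookFwd name env with
      | some v => some v
      | none => m.get? name := by
  induction env generalizing m with
  | nil => rfl
  | cons d rest ih =>
    simp only [List.foldl_cons, lookFwd]
    rw [ih _ (fun e he => hnd e (List.mem_cons_of_mem _ he))]
    cases lookFwd name rest with
    | some v => rfl
    | none =>
      simp only
      rw [get?_foldl_insert_scope name d m (hnd d List.mem_cons_self)]
      cases d.find? (fun p => p.1 == name) <;> rfl

-- ===== VERDICT (by name: the statement is the Claim_ definition above) =====
theorem do_get_spec : Claim_equal_do_get := by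
  intro env args _ hpre
  obtain ⟨_, hnd, _⟩ := hpre
  show do_get env args = do_get_alt env args
  simp only [do_get, do_get_alt]
  rw [lookRevA_eq, get?_merge _ _ _ hnd, ← lookFwd_eq_rev]
  cases lookFwd ((PySem.List.pyGet? args 0).getD "") env <;> simp [PySem.Dict.get?_empty]
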